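-- pv_equiv track=rewrite | github.com/kamalika0363/Coding_Problems | maxOccurences.py | getMaxOccurrences
-- ===== SOURCE A (Python) =====
-- def getMaxOccurrences(components, minLength, maxLength, maxUnique):
--     max_count = 0
--     for length in range(minLength + 2, maxLength + 3):
--         for i in range(len(components) - length + 1):
--             substring = components[i:i + length]
--             unique_chars = len(set(substring))
--             if unique_chars <= maxUnique:
--                 max_count = max(max_count, 1)
--     return max_count
-- ===== SOURCE B (Python) =====
-- def getMaxOccurrences(components, minLength, maxLength, maxUnique):
--     # A substring with <= maxUnique distinct chars at some length implies the same
--     # at every shorter length, so only the smallest length in A's range matters.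
--     if maxUnique < 0 or minLength > maxLength:
--         return 0
--     L = minLength + 2
--     if L <= 0:
--         return 1
--     for i in range(len(components) - L + 1):
--         if len(set(components[i:i + L])) <= maxUnique:
--             return 1
--     return 0
-- ===== Notes on version B (the rewrite author's own statement) =====
-- stated objective: alternative
-- what changed: B drops A's outer loop over every window length: a window has <=maxUnique distinct chars only if its prefix of the smallest length in the range does, so B scans windows of length minLength+2 only (with constant-time early exits for an empty length range, negative maxUnique, and non-positive window length) and returns on the first hit.
import Mathlib
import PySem

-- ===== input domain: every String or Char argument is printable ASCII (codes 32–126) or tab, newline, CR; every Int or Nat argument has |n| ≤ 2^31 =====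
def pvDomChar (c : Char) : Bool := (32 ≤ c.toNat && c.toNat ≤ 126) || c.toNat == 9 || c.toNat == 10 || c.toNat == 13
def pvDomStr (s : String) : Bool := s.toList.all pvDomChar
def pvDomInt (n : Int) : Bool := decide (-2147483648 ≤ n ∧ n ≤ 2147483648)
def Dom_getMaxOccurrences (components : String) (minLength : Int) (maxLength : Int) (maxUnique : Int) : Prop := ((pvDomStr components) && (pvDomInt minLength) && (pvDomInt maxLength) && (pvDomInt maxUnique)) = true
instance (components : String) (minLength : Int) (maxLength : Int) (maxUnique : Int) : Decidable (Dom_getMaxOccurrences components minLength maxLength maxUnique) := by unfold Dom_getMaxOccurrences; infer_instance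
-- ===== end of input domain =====

-- B replaces A's scan over every window length in the range by a single scan over the
-- windows of the smallest length only (a window qualifies iff its prefix of the
-- smallest length qualifies); objective: alternative (the outer length loop is removed).

-- ===== PORT A =====
def getMaxOccurrences (components : String) (minLength : Int) (maxLength : Int) (maxUnique : Int) : Int :=
  (PySem.List.pyRange (minLength + 2) (maxLength + 3) 1).foldl (fun max_count length =>
    (PySem.List.pyRange 0 (PySem.Str.len components - length + 1) 1).foldl (fun mc i =>
      let substring := PySem.List.slice components.toList (some i) (some (i + length))
      let unique_chars := (PySem.Set.ofList substring).length
      if (unique_chars : Int) ≤ maxUnique then max mc 1 else mc) max_count) 0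

-- ===== PORT B =====
-- the early-returning "for i in range(...): if …: return 1" loop of Source B
def pvAltLoop (s : List Char) (L : Int) (maxUnique : Int) : List Int → Int
  | [] => 0
  | i :: rest =>
    if ((PySem.Set.ofList (PySem.List.slice s (some i) (some (i + L)))).length : Int) ≤ maxUnique
    then 1 else pvAltLoop s L maxUnique rest

def getMaxOccurrences_alt (components : String) (minLength : Int) (maxLength : Int) (maxUnique : Int) : Int :=
  if maxUnique < 0 ∨ minLength > maxLength then 0
  else
    let L := minLength + 2
    if L ≤ 0 then 1
    else pvAltLoop components.toList L maxUnique
      (PySem.List.pyRange 0 (PySem.Str.len components - L + 1) 1)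

-- ===== PRECONDITION & SPEC =====
def Spec_getMaxOccurrences (components : String) (minLength : Int) (maxLength : Int) (maxUnique : Int) (out : Int) : Prop := out = getMaxOccurrences_alt components minLength maxLength maxUnique
instance (components : String) (minLength : Int) (maxLength : Int) (maxUnique : Int) (out : Int) : Decidable (Spec_getMaxOccurrences components minLength maxLength maxUnique out) := by unfold Spec_getMaxOccurrences; infer_instance

-- ===== CLAIM (what is proved, stated in full; the proofs are below) =====
def Claim_equal_getMaxOccurrences : Prop := ∀ (components : String) (minLength : Int) (maxLength : Int) (maxUnique : Int), Dom_getMaxOccurrences components minLength maxLength maxUnique → Spec_getMaxOccurrences components minLength maxLength maxUnique (getMaxOccurrences components minLength maxLength maxUnique)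

-- ===== LEMMAS AND PROOFS =====

-- number of distinct characters of the window s[i:i+ℓ], as an Int
def pvUC (s : List Char) (i ℓ : Int) : Int :=
  ((PySem.Set.ofList (PySem.List.slice s (some i) (some (i + ℓ)))).length : Int)

-- "window of length ℓ at i qualifies"
def pvHit (s : List Char) (U ℓ i : Int) : Bool := decide (pvUC s i ℓ ≤ U)

-- "some window of length ℓ qualifies" (n = len(components))
def pvInner (s : List Char) (U n ℓ : Int) : Bool :=
  (PySem.List.pyRange 0 (n - ℓ + 1) 1).any (fun i => pvHit s U ℓ i)

theorem pvUC_nonneg (s : List Char) (i ℓ : Int) : 0 ≤ pvUC s i ℓ := Int.natCast_nonneg _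

theorem foldl_hit (c : Int → Bool) (l : List Int) (acc : Int) :
    l.foldl (fun mc x => if c x then max mc 1 else mc) acc
      = if l.any c then max acc 1 else acc := by
  induction l generalizing acc with
  | nil => simp
  | cons a t ih =>
    cases hc : c a with
    | true =>
      rw [List.foldl_cons, if_pos hc, ih]
      by_cases h2 : t.any c = true <;>
        simp [hc, h2]
    | false =>
      rw [List.foldl_cons, if_neg (by simp [hc]), ih]
      by_cases h2 : t.any c = true <;> simp [hc, h2]

-- A as an existence test over all window lengths in its range
theorem getMaxOccurrences_eq_if (components : String) (minLength maxLength maxUnique : Int) :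
    getMaxOccurrences components minLength maxLength maxUnique
      = if (PySem.List.pyRange (minLength + 2) (maxLength + 3) 1).any
            (fun ℓ => pvInner components.toList maxUnique (PySem.Str.len components) ℓ)
        then 1 else 0 := by
  unfold getMaxOccurrences
  have hstep : (fun (max_count length : Int) =>
      (PySem.List.pyRange 0 (PySem.Str.len components - length + 1) 1).foldl (fun mc i =>
        let substring := PySem.List.slice components.toList (some i) (some (i + length))
        let unique_chars := (PySem.Set.ofList substring).length
        if (unique_chars : Int) ≤ maxUnique then max mc 1 else mc) max_count)
      = (fun (max_count length : Int) =>
          if pvInner components.toList maxUnique (PySem.Str.len components) length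
          then max max_count 1 else max_count) := by
    funext mc ℓ
    have hbody : (fun (mc i : Int) =>
        let substring := PySem.List.slice components.toList (some i) (some (i + ℓ))
        let unique_chars := (PySem.Set.ofList substring).length
        if (unique_chars : Int) ≤ maxUnique then max mc 1 else mc)
        = (fun (mc i : Int) => if pvHit components.toList maxUnique ℓ i then max mc 1 else mc) := by
      funext mc' i
      by_cases h : ((PySem.Set.ofList (PySem.List.slice components.toList (some i) (some (i + ℓ)))).length : Int) ≤ maxUnique <;>
        simp [pvHit, pvUC]
    rw [hbody, foldl_hit]
    rfl
  rw [hstep, foldl_hit]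
  split_ifs <;> simp

-- B's loop as the same existence test at one fixed length
theorem pvAltLoop_eq (s : List Char) (L U : Int) (l : List Int) :
    pvAltLoop s L U l = if l.any (fun i => pvHit s U L i) then 1 else 0 := by
  induction l with
  | nil => simp [pvAltLoop]
  | cons a t ih =>
    by_cases h : pvUC s a L ≤ U
    · have h' : ((PySem.Set.ofList (PySem.List.slice s (some a) (some (a + L)))).length : Int) ≤ U := h
      simp [pvAltLoop, if_pos h', pvHit, h]
    · have h' : ¬ ((PySem.Set.ofList (PySem.List.slice s (some a) (some (a + L)))).length : Int) ≤ U := h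
      rw [pvAltLoop, if_neg h', ih]
      by_cases h2 : t.any (fun i => pvHit s U L i) = true <;> simp [pvHit, h]

-- a shorter window at the same start has no more distinct characters
theorem pvUC_mono (s : List Char) (i L ℓ : Int) (hi : 0 ≤ i) (hL : 0 < L) (hLl : L ≤ ℓ) :
    pvUC s i L ≤ pvUC s i ℓ := by
  unfold pvUC
  rw [PySem.List.slice_toNat s hi (by omega : (0:Int) ≤ i + L),
      PySem.List.slice_toNat s hi (by omega : (0:Int) ≤ i + ℓ)]
  have hsub : ∀ x ∈ List.take ((i + L).toNat - i.toNat) (List.drop i.toNat s),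
      x ∈ List.take ((i + ℓ).toNat - i.toNat) (List.drop i.toNat s) := by
    intro x hx
    have htt : List.take ((i + L).toNat - i.toNat) (List.drop i.toNat s)
        = List.take ((i + L).toNat - i.toNat) (List.take ((i + ℓ).toNat - i.toNat) (List.drop i.toNat s)) := by
      rw [List.take_take, min_eq_left (by omega)]
    rw [htt] at hx
    exact List.mem_of_mem_take hx
  -- compare the two duplicate-free lists through their finsets
  have hlen : ∀ (l1 l2 : List Char), l1.Nodup → (∀ x ∈ l1, x ∈ l2) → l1.length ≤ l2.length := by
    intro l1 l2 h1 h
    calc l1.length = l1.toFinset.card := (List.toFinset_card_of_nodup h1).symm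
      _ ≤ l2.toFinset.card := Finset.card_le_card
          (fun x hx => List.mem_toFinset.2 (h x (List.mem_toFinset.1 hx)))
      _ ≤ l2.length := l2.toFinset_card_le
  exact_mod_cast hlen _ _ (PySem.Set.nodup_ofList _)
    (fun x hx => (PySem.Set.mem_ofList _ _).2 (hsub x ((PySem.Set.mem_ofList _ _).1 hx)))

-- a window with stop index 0 and nonnegative start is empty
theorem pvUC_stop_zero (s : List Char) (i L : Int) (hi : 0 ≤ i) (h0 : i + L = 0) :
    pvUC s i L = 0 := by
  unfold pvUC
  rw [h0, PySem.List.slice_toNat s hi le_rfl]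
  simp

theorem getMaxOccurrences_spec : Claim_equal_getMaxOccurrences := by
  intro components minLength maxLength maxUnique _
  unfold Spec_getMaxOccurrences getMaxOccurrences_alt
  rw [getMaxOccurrences_eq_if]
  have hn0 : 0 ≤ PySem.Str.len components := by
    rw [PySem.Str.len_eq]; exact Int.natCast_nonneg _
  by_cases hbad : maxUnique < 0 ∨ minLength > maxLength
  · rw [if_pos hbad, if_neg]
    intro h
    rw [List.any_eq_true] at h
    obtain ⟨ℓ, hℓ, h2⟩ := h
    rw [pvInner, List.any_eq_true] at h2
    obtain ⟨i, _, hhit⟩ := h2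
    rw [pvHit, decide_eq_true_eq] at hhit
    rcases hbad with hU | hmm
    · exact absurd (le_trans (pvUC_nonneg components.toList i ℓ) hhit) (by omega)
    · rw [PySem.List.mem_pyRange_one] at hℓ; omega
  · rw [if_neg hbad]
    have hU : 0 ≤ maxUnique := by omega
    have hmm : minLength ≤ maxLength := by omega
    show _ = if minLength + 2 ≤ 0 then 1
      else pvAltLoop components.toList (minLength + 2) maxUnique
        (PySem.List.pyRange 0 (PySem.Str.len components - (minLength + 2) + 1) 1)
    by_cases hL : minLength + 2 ≤ 0
    · rw [if_pos hL, if_pos]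
      rw [List.any_eq_true]
      refine ⟨minLength + 2, PySem.List.mem_pyRange_one.2 ⟨le_rfl, by omega⟩, ?_⟩
      rw [pvInner, List.any_eq_true]
      refine ⟨-(minLength + 2), PySem.List.mem_pyRange_one.2 ⟨by omega, by omega⟩, ?_⟩
      rw [pvHit, decide_eq_true_eq, pvUC_stop_zero components.toList _ _ (by omega) (by ring)]
      omega
    · rw [if_neg hL, pvAltLoop_eq]
      have hany : (PySem.List.pyRange (minLength + 2) (maxLength + 3) 1).any
            (fun ℓ => pvInner components.toList maxUnique (PySem.Str.len components) ℓ)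
          = (PySem.List.pyRange 0 (PySem.Str.len components - (minLength + 2) + 1) 1).any
            (fun i => pvHit components.toList maxUnique (minLength + 2) i) := by
      -- both tests succeed on the same inputs: monotonicity in the window length
        rw [Bool.eq_iff_iff]
        simp only [List.any_eq_true, pvInner, pvHit, decide_eq_true_eq]
        constructor
        · rintro ⟨ℓ, hℓ, i, hi, hle⟩
          rw [PySem.List.mem_pyRange_one] at hℓ hi
          refine ⟨i, PySem.List.mem_pyRange_one.2 ⟨hi.1, by omega⟩, ?_⟩
          exact le_trans (pvUC_mono components.toList i _ ℓ hi.1 (by omega) (by omega)) hle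
        · rintro ⟨i, hi, hle⟩
          exact ⟨minLength + 2, PySem.List.mem_pyRange_one.2 ⟨le_rfl, by omega⟩, i, hi, hle⟩
      rw [hany]
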